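-- pv_equiv track=rewrite | github.com/Rubal0990/GFG-DSA | Valid Compressed String - GFG/valid-compressed-string.py | checkCompressed
-- ===== SOURCE A (Python) =====
-- def checkCompressed(S, T):
--     i, j, N, M = 0, 0, len(S), len(T)
--     while i < N and j < M:
--         if not T[j].isdigit():
--             if T[j] != S[i]:
--                 return 0
--
--             i, j = i + 1, j + 1
--
--         else:
--             k = j + 1
--             while k < M and T[k].isdigit():
--                 k += 1
--
--             i += int(T[j:k])
--             j = k
--
--     return 1 if i==N and j==M else 0
-- ===== SOURCE B (Python) =====
-- def checkCompressed(S, T):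
--     # pass 1: tokenize T into integer tokens (maximal digit runs) and literal chars
--     tokens = []
--     j = 0
--     while j < len(T):
--         if T[j].isdigit():
--             k = j
--             while k < len(T) and T[k].isdigit():
--                 k += 1
--             tokens.append(int(T[j:k]))
--             j = k
--         else:
--             tokens.append(T[j])
--             j += 1
--     # pass 2: walk S with one pointer driven by the tokens
--     i = 0
--     for tok in tokens:
--         if i >= len(S):
--             return 0
--         if isinstance(tok, int):
--             i += tok
--         elif S[i] != tok:
--             return 0
--         else:
--             i += 1
--     return 1 if i == len(S) else 0
-- ===== Notes on version B (the rewrite author's own statement) =====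
-- stated objective: alternative
-- what changed: A interleaves parsing of T and matching against S in one two-pointer while loop; B first tokenizes T into a list of integer/literal tokens and then matches the token list against S with a single pointer.
import Mathlib
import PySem

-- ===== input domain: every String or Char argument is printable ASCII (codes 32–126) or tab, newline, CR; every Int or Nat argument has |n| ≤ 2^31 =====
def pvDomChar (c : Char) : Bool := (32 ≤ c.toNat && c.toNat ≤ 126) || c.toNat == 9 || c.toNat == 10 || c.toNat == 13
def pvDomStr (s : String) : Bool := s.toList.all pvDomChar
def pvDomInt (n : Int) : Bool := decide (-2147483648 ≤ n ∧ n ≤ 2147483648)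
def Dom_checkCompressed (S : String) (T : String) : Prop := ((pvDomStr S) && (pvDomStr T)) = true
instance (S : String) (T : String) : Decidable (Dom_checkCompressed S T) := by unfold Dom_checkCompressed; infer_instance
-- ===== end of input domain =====

-- B tokenizes T first and then matches the tokens against S, instead of A's interleaved
-- two-pointer walk; same cost, different decomposition ("alternative").

-- ===== PORT A =====
-- shared helper: the inner 'while k < M and T[k].isdigit(): k += 1' scan (both Pythons contain it)
def pvSkipDigits (T : List Char) (k : Nat) : Nat :=
  if h : k < T.length then
    if PySem.Chars.isdigit T[k] then pvSkipDigits T (k + 1) else k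
  else k
termination_by T.length - k

theorem pvSkipDigits_ge (T : List Char) (k : Nat) : k ≤ pvSkipDigits T k := by
  unfold pvSkipDigits
  split
  · split
    · exact Nat.le_trans (Nat.le_succ k) (pvSkipDigits_ge T (k + 1))
    · exact Nat.le_refl k
  · exact Nat.le_refl k
termination_by T.length - k

-- when T[k] is a digit the scan from k equals the scan from k+1 (used by B's tokenizer
-- for termination, and by the equivalence proof)
theorem pvSkipDigits_step (T : List Char) (k : Nat) (h : k < T.length)
    (hd : PySem.Chars.isdigit T[k] = true) :
    pvSkipDigits T k = pvSkipDigits T (k + 1) := by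
  rw [pvSkipDigits, dif_pos h, if_pos hd]

-- int(run) for a nonempty run of ASCII digits; exact on that domain (the only way A/B call it)
def pvDigitsVal (cs : List Char) : Nat :=
  cs.foldl (fun a c => 10 * a + (c.toNat - 48)) 0

-- the while loop of A: two pointers i into S, j into T
def pvGoA (S T : List Char) (i j : Nat) : Int :=
  if h : i < S.length ∧ j < T.length then
    if hd : PySem.Chars.isdigit (T[j]'h.2) = false then
      if (T[j]'h.2) ≠ (S[i]'h.1) then 0
      else pvGoA S T (i + 1) (j + 1)
    else
      let k := pvSkipDigits T (j + 1)
      pvGoA S T (i + pvDigitsVal ((T.drop j).take (k - j))) k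
  else
    if i = S.length ∧ j = T.length then 1 else 0
termination_by T.length - j
decreasing_by
  · omega
  · have := pvSkipDigits_ge T (j + 1); omega

def checkCompressed (S : String) (T : String) : Int :=
  pvGoA S.toList T.toList 0 0

-- ===== PORT B =====
-- a token of B: an integer run or a literal character
inductive PvTok where
  | num : Nat → PvTok
  | lit : Char → PvTok
deriving DecidableEq, Repr

-- pass 1 of B: tokenize T
def pvTokenize (T : List Char) (j : Nat) : List PvTok :=
  if h : j < T.length then
    if hd : PySem.Chars.isdigit (T[j]'h) then
      let k := pvSkipDigits T j
      PvTok.num (pvDigitsVal ((T.drop j).take (k - j))) :: pvTokenize T k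
    else
      PvTok.lit (T[j]'h) :: pvTokenize T (j + 1)
  else []
termination_by T.length - j
decreasing_by
  · have h1 := pvSkipDigits_step T j h hd
    have h2 := pvSkipDigits_ge T (j + 1)
    omega
  · omega

-- pass 2 of B: match the tokens against S with one pointer
def pvScan (S : List Char) (i : Nat) : List PvTok → Int
  | [] => if i = S.length then 1 else 0
  | t :: rest =>
    if hi : i < S.length then
      match t with
      | PvTok.num v => pvScan S (i + v) rest
      | PvTok.lit c => if (S[i]'hi) ≠ c then 0 else pvScan S (i + 1) rest
    else 0

def checkCompressed_alt (S : String) (T : String) : Int :=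
  pvScan S.toList 0 (pvTokenize T.toList 0)

-- ===== PRECONDITION & SPEC =====
def Spec_checkCompressed (S : String) (T : String) (out : Int) : Prop := out = checkCompressed_alt S T
instance (S : String) (T : String) (out : Int) : Decidable (Spec_checkCompressed S T out) := by unfold Spec_checkCompressed; infer_instance

-- ===== CLAIM (what is proved, stated in full; the proofs are below) =====
def Claim_equal_checkCompressed : Prop := ∀ (S : String) (T : String), Dom_checkCompressed S T → Spec_checkCompressed S T (checkCompressed S T)

-- ===== LEMMAS AND PROOFS =====

theorem pvSkipDigits_le (T : List Char) (k : Nat) (h : k ≤ T.length) :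
    pvSkipDigits T k ≤ T.length := by
  unfold pvSkipDigits
  split
  · split
    · next hk _ => exact pvSkipDigits_le T (k + 1) hk
    · exact h
  · exact h
termination_by T.length - k


-- the core invariant: A's loop from (i, j) equals B's scan of the tokens of T from j
theorem pvGoA_eq_scan (S T : List Char) (i j : Nat) (hj : j ≤ T.length) :
    pvGoA S T i j = pvScan S i (pvTokenize T j) := by
  unfold pvGoA pvTokenize
  by_cases hjM : j < T.length
  · by_cases hiN : i < S.length
    · rw [dif_pos (⟨hiN, hjM⟩ : i < S.length ∧ j < T.length), dif_pos hjM]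
      by_cases hd : PySem.Chars.isdigit (T[j]'hjM) = true
      · rw [dif_neg (by simp [hd]), dif_pos hd]
        have hk := pvSkipDigits_step T j hjM hd
        have hle : pvSkipDigits T (j + 1) ≤ T.length := pvSkipDigits_le T (j + 1) hjM
        simp only [pvScan, dif_pos hiN, hk]
        exact pvGoA_eq_scan S T (i + pvDigitsVal ((T.drop j).take (pvSkipDigits T (j + 1) - j)))
          (pvSkipDigits T (j + 1)) hle
      · rw [dif_pos (by simp [hd]), dif_neg hd]
        simp only [pvScan, dif_pos hiN]
        by_cases hc : (T[j]'hjM) = (S[i]'hiN)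
        · rw [if_neg (show ¬(T[j]'hjM) ≠ (S[i]'hiN) from fun hh => hh hc),
              if_neg (show ¬(S[i]'hiN) ≠ (T[j]'hjM) from fun hh => hh hc.symm)]
          exact pvGoA_eq_scan S T (i + 1) (j + 1) hjM
        · rw [if_pos (show (T[j]'hjM) ≠ (S[i]'hiN) from hc),
              if_pos (show (S[i]'hiN) ≠ (T[j]'hjM) from fun hh => hc hh.symm)]
    · -- S exhausted but a token of T remains: both sides return 0
      rw [dif_neg (by omega), dif_pos hjM]
      rw [if_neg (show ¬(i = S.length ∧ j = T.length) by omega)]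
      by_cases hd : PySem.Chars.isdigit (T[j]'hjM) = true
      · rw [dif_pos hd]; simp only [pvScan, dif_neg hiN]
      · rw [dif_neg hd]; simp only [pvScan, dif_neg hiN]
  · -- T exhausted: j = T.length, no tokens left
    have hje : j = T.length := by omega
    rw [dif_neg (by omega), dif_neg hjM]
    simp only [pvScan, hje]
    by_cases hi : i = S.length <;> simp [hi]
termination_by T.length - j
decreasing_by
  · have := pvSkipDigits_ge T (j + 1); omega
  · omega

-- ===== VERDICT (by name: the statement is the Claim_ definition above) =====
theorem checkCompressed_spec : Claim_equal_checkCompressed := by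
  intro S T _
  unfold Spec_checkCompressed checkCompressed checkCompressed_alt
  exact pvGoA_eq_scan S.toList T.toList 0 0 (Nat.zero_le _)
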